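-- pv_equiv track=rewrite | github.com/AnonymousAuthor2026/SLGParser | LogProcessor.py | token_postprocess
-- ===== SOURCE A (Python) =====
-- def token_postprocess(message):
--     new_message = []
--     for token in message:
--         while "<*><*>" in token:
--             token = token.replace("<*><*>", '<*>')
--         new_message.append(token)
--     message_result = ' '.join(new_message)
--     return message_result
-- ===== SOURCE B (Python) =====
-- def token_postprocess(message):
--     new_message = []
--     for token in message:
--         out = []
--         prev = False
--         i = 0
--         n = len(token)
--         while i < n:
--             if token[i:i+3] == '<*>':
--                 if not prev:
--                     out.append('<*>')
--                 prev = True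
--                 i += 3
--             else:
--                 out.append(token[i])
--                 prev = False
--                 i += 1
--         new_message.append(''.join(out))
--     return ' '.join(new_message)
-- ===== Notes on version B (the rewrite author's own statement) =====
-- stated objective: alternative
-- what changed: Replaces the per-token fixed-point loop of repeated '<*><*>'-to-'<*>' str.replace scans with a single left-to-right scan that keeps a prev-marker flag and emits each maximal run of consecutive '<*>' markers once.
import Mathlib
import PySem

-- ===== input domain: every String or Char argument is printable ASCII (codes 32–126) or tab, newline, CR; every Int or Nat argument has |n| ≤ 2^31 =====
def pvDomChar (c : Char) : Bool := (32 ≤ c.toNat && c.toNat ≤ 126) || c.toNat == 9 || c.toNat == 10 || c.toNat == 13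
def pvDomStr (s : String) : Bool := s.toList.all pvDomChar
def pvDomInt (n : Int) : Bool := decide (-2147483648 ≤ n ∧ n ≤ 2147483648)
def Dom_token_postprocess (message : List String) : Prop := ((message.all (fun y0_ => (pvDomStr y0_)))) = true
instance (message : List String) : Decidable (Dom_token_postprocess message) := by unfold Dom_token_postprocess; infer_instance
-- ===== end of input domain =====

-- B replaces A's per-token fixed-point loop of repeated "<*><*>"→"<*>" replaces by one
-- left-to-right scan with a prev-marker flag.

-- ===== PORT A =====
-- the pattern "<*><*>" and the replacement "<*>" of A's while loop, as char lists
def pvPat : List Char := ['<', '*', '>', '<', '*', '>']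
def pvRep : List Char := ['<', '*', '>']

-- One pass of Python's `token.replace("<*><*>", "<*>")`, written as a plain
-- recursion; `pvReplace_eq_R` proves it IS PySem.Chars.replace for this pattern,
-- and `pvR_length_lt` is the termination measure A's while loop cites.
def pvR : List Char → List Char
  | [] => []
  | c :: t => if pvPat.isPrefixOf (c :: t) then pvRep ++ pvR (t.drop 5) else c :: pvR t
termination_by l => l.length
decreasing_by
  · simp only [List.length_drop, List.length_cons]; omega
  · simp

theorem pvGo_eq_R (fuel : Nat) : ∀ (l acc : List Char), l.length ≤ fuel →
    PySem.Chars.replace.go pvPat pvRep fuel l acc = acc.reverse ++ pvR l := by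
  induction fuel with
  | zero =>
    intro l acc hl
    have : l = [] := by cases l <;> simp_all
    subst this
    simp [PySem.Chars.replace.go, pvR]
  | succ n ih =>
    intro l acc hl
    cases l with
    | nil => simp [PySem.Chars.replace.go, pvR]
    | cons c t =>
      rw [PySem.Chars.replace.go]
      by_cases hp : pvPat.isPrefixOf (c :: t) = true
      · simp only [hp, if_true]
        have hlen : (List.drop pvPat.length (c :: t)).length ≤ n := by
          simp [pvPat, List.length_drop] at hl ⊢
          omega
        rw [ih _ _ hlen]
        have hd : List.drop pvPat.length (c :: t) = List.drop 5 t := by simp [pvPat]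
        conv_rhs => rw [pvR]
        simp [hp, hd, List.append_assoc]
      · simp only [hp]
        have hlen : t.length ≤ n := by simp at hl; omega
        rw [ih _ _ hlen]
        conv_rhs => rw [pvR]
        simp [hp]

theorem pvReplace_eq_R (l : List Char) :
    PySem.Chars.replace l pvPat pvRep = pvR l := by
  rw [PySem.Chars.replace]
  simp only [show pvPat.isEmpty = false from rfl, Bool.false_eq_true, if_false]
  simpa using pvGo_eq_R l.length l [] le_rfl

theorem pvR_length_le (l : List Char) : (pvR l).length ≤ l.length := by
  induction l using pvR.induct with
  | case1 => simp [pvR]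
  | case2 c t hp ih =>
    rw [pvR, if_pos hp]
    have h6 : 6 ≤ (c :: t).length := List.IsPrefix.length_le (List.isPrefixOf_iff_prefix.mp hp)
    simp only [List.length_append, List.length_drop, List.length_cons] at ih ⊢
    simp only [List.length_cons] at h6
    simp only [pvRep, List.length_cons, List.length_nil]
    omega
  | case3 c t hp ih =>
    rw [pvR, if_neg hp]
    simp only [List.length_cons]
    omega

theorem pvR_length_lt (l : List Char) (h : pvPat <:+: l) : (pvR l).length < l.length := by
  induction l using pvR.induct with
  | case1 => simp [pvPat] at h
  | case2 c t hp ih =>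
    rw [pvR, if_pos hp]
    simp only [List.length_append, List.length_cons]
    have h6 : 6 ≤ (c :: t).length := List.IsPrefix.length_le (List.isPrefixOf_iff_prefix.mp hp)
    simp only [List.length_cons] at h6
    have hle := pvR_length_le (t.drop 5)
    simp only [List.length_drop] at hle
    simp only [pvRep, List.length_cons, List.length_nil]
    omega
  | case3 c t hp ih =>
    rw [pvR, if_neg hp]
    simp only [List.length_cons]
    rcases List.infix_cons_iff.mp h with hpre | hinf
    · exact absurd (List.isPrefixOf_iff_prefix.mpr hpre) hp
    · have := ih hinf; omega

-- A's inner while loop: while "<*><*>" in token: token = token.replace("<*><*>", "<*>")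
def pvCollapseA (l : List Char) : List Char :=
  if PySem.Chars.isIn pvPat l then pvCollapseA (PySem.Chars.replace l pvPat pvRep) else l
termination_by l.length
decreasing_by
  rename_i h
  rw [pvReplace_eq_R]
  exact pvR_length_lt l ((PySem.Chars.isIn_iff_infix _ _).mp h)

def token_postprocess (message : List String) : String :=
  PySem.Str.join " "
    (message.foldl (fun acc token => acc ++ [String.ofList (pvCollapseA token.toList)]) [])

-- ===== PORT B =====
-- B's inner scan: token[i:i+3] == '<*>' is the 3-char-prefix test on the rest of
-- the token; prev records whether the piece just consumed was a marker.
def pvScanB (l : List Char) (prev : Bool) : List Char :=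
  match l with
  | [] => []
  | c :: t =>
    if pvRep.isPrefixOf (c :: t) then
      (if prev then [] else pvRep) ++ pvScanB (t.drop 2) true
    else c :: pvScanB t false
termination_by l.length
decreasing_by
  · simp only [List.length_drop, List.length_cons]; omega
  · simp

def token_postprocess_alt (message : List String) : String :=
  PySem.Str.join " "
    (message.foldl (fun acc token => acc ++ [String.ofList (pvScanB token.toList false)]) [])

-- ===== PRECONDITION & SPEC =====
def Spec_token_postprocess (message : List String) (out : String) : Prop := out = token_postprocess_alt message
instance (message : List String) (out : String) : Decidable (Spec_token_postprocess message out) := by unfold Spec_token_postprocess; infer_instance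

-- ===== CLAIM (what is proved, stated in full; the proofs are below) =====
def Claim_equal_token_postprocess : Prop := ∀ (message : List String), Dom_token_postprocess message → Spec_token_postprocess message (token_postprocess message)

-- ===== LEMMAS AND PROOFS =====

theorem pvR_nil : pvR [] = [] := by simp [pvR]

theorem pvScanB_nil (b : Bool) : pvScanB [] b = [] := by simp [pvScanB]

theorem pvR_head? (l : List Char) : (pvR l).head? = l.head? := by
  cases l with
  | nil => simp [pvR]
  | cons c t =>
    rw [pvR]
    by_cases hp : pvPat.isPrefixOf (c :: t) = true
    · rw [if_pos hp]
      have hc : c = '<' := by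
        rcases List.isPrefixOf_iff_prefix.mp hp with ⟨u, hu⟩
        simpa [pvPat] using congrArg List.head? hu.symm
      simp [pvRep, hc]
    · rw [if_neg hp]
      simp

theorem pvScanB_marker (X : List Char) (b : Bool) :
    pvScanB ('<' :: '*' :: '>' :: X) b = (if b then [] else pvRep) ++ pvScanB X true := by
  rw [pvScanB]
  simp [pvRep, List.isPrefixOf]

theorem pvScanB_nonmarker (c : Char) (t : List Char) (b : Bool)
    (h : ¬ pvRep.isPrefixOf (c :: t) = true) :
    pvScanB (c :: t) b = c :: pvScanB t false := by
  rw [pvScanB]; simp [h]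

theorem pvR_cons_marker (r : List Char) (h : ¬ pvPat.isPrefixOf (pvRep ++ r) = true) :
    pvR (pvRep ++ r) = pvRep ++ pvR r := by
  show pvR ('<' :: '*' :: '>' :: r) = pvRep ++ pvR r
  have h' : ¬ pvPat.isPrefixOf ('<' :: '*' :: '>' :: r) = true := h
  rw [pvR, if_neg h']
  have h1 : ¬ pvPat.isPrefixOf ('*' :: '>' :: r) = true := by
    simp [pvPat, List.isPrefixOf]
  have h2 : ¬ pvPat.isPrefixOf ('>' :: r) = true := by
    simp [pvPat, List.isPrefixOf]
  rw [pvR, if_neg h1, pvR, if_neg h2]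
  rfl

theorem pvR_pat (r : List Char) : pvR (pvPat ++ r) = pvRep ++ pvR r := by
  show pvR ('<' :: '*' :: '>' :: '<' :: '*' :: '>' :: r) = pvRep ++ pvR r
  have hc : pvPat.isPrefixOf ('<' :: '*' :: '>' :: '<' :: '*' :: '>' :: r) = true :=
    List.isPrefixOf_iff_prefix.mpr ⟨r, rfl⟩
  rw [pvR, if_pos hc]
  simp

-- the one-pass replace never turns a non-marker start into a marker start
theorem pvRep_prefix_of_R (t : List Char) (h : ['*', '>'] <+: pvR t) : ['*', '>'] <+: t := by
  cases t with
  | nil => rw [pvR_nil] at h; simp at h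
  | cons d u =>
    rw [pvR] at h
    by_cases hp : pvPat.isPrefixOf (d :: u) = true
    · rw [if_pos hp] at h
      rcases (List.cons_prefix_cons.mp h) with ⟨h1, _⟩
      simp at h1
    · rw [if_neg hp] at h
      rcases List.cons_prefix_cons.mp h with ⟨hd, hu⟩
      subst hd
      have hhead : (pvR u).head? = some '>' := by
        rcases hu with ⟨w, hw⟩
        rw [← hw]; rfl
      rw [pvR_head?] at hhead
      cases u with
      | nil => simp at hhead
      | cons e v =>
        have he : e = '>' := by simpa using hhead
        subst he
        exact List.cons_prefix_cons.mpr ⟨rfl, ⟨v, rfl⟩⟩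

theorem pvScanB_R (n : Nat) : ∀ (l : List Char), l.length ≤ n → ∀ (b : Bool),
    pvScanB (pvR l) b = pvScanB l b := by
  induction n with
  | zero =>
    intro l hl b
    have : l = [] := by cases l <;> simp_all
    subst this
    rw [pvR_nil]
  | succ n ih =>
    intro l hl b
    by_cases hpat : pvPat.isPrefixOf l = true
    · rcases List.isPrefixOf_iff_prefix.mp hpat with ⟨r, hr⟩
      subst hr
      have hlr : r.length ≤ n := by simp [pvPat] at hl; omega
      rw [pvR_pat]
      show pvScanB ('<' :: '*' :: '>' :: pvR r) b = pvScanB ('<' :: '*' :: '>' :: '<' :: '*' :: '>' :: r) b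
      rw [pvScanB_marker, pvScanB_marker, pvScanB_marker, ih r hlr true]
      simp
    · by_cases hrep : pvRep.isPrefixOf l = true
      · rcases List.isPrefixOf_iff_prefix.mp hrep with ⟨r, hr⟩
        subst hr
        have hlr : r.length ≤ n := by simp [pvRep] at hl; omega
        rw [pvR_cons_marker r hpat]
        show pvScanB ('<' :: '*' :: '>' :: pvR r) b = pvScanB ('<' :: '*' :: '>' :: r) b
        rw [pvScanB_marker, pvScanB_marker, ih r hlr true]
      · cases l with
        | nil => rw [pvR_nil]
        | cons c t =>
          have hRl : pvR (c :: t) = c :: pvR t := by rw [pvR, if_neg hpat]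
          rw [hRl]
          have hnp : ¬ pvRep.isPrefixOf (c :: pvR t) = true := by
            intro hpre
            rcases List.cons_prefix_cons.mp (List.isPrefixOf_iff_prefix.mp hpre) with ⟨hc, hrest⟩
            exact hrep (List.isPrefixOf_iff_prefix.mpr
              (List.cons_prefix_cons.mpr ⟨hc, pvRep_prefix_of_R t hrest⟩))
          rw [pvScanB_nonmarker c (pvR t) b hnp, pvScanB_nonmarker c t b hrep]
          have hlt : t.length ≤ n := by simp at hl; omega
          rw [ih t hlt false]

-- on a token with no "<*><*>" occurrence the scan is the identity
theorem pvScanB_id (n : Nat) : ∀ (l : List Char), l.length ≤ n → ¬ pvPat <:+: l →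
    pvScanB l false = l ∧ (¬ pvRep.isPrefixOf l = true → pvScanB l true = l) := by
  induction n with
  | zero =>
    intro l hl _
    have : l = [] := by cases l <;> simp_all
    subst this
    exact ⟨pvScanB_nil false, fun _ => pvScanB_nil true⟩
  | succ n ih =>
    intro l hl hinf
    by_cases hrep : pvRep.isPrefixOf l = true
    · rcases List.isPrefixOf_iff_prefix.mp hrep with ⟨r, hr⟩
      subst hr
      have hlr : r.length ≤ n := by simp [pvRep] at hl; omega
      have hrinf : ¬ pvPat <:+: r := fun h =>
        hinf (h.trans (List.suffix_append pvRep r).isInfix)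
      have hrrep : ¬ pvRep.isPrefixOf r = true := by
        intro h
        rcases List.isPrefixOf_iff_prefix.mp h with ⟨u, hu⟩
        exact hinf ⟨[], u, by rw [← hu]; rfl⟩
      have hid := (ih r hlr hrinf).2 hrrep
      refine ⟨?_, fun h => absurd hrep h⟩
      show pvScanB ('<' :: '*' :: '>' :: r) false = pvRep ++ r
      rw [pvScanB_marker, hid]
      rfl
    · cases l with
      | nil => exact ⟨pvScanB_nil false, fun _ => pvScanB_nil true⟩
      | cons c t =>
        have hlt : t.length ≤ n := by simp at hl; omega
        have htinf : ¬ pvPat <:+: t := fun h =>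
          hinf (h.trans (List.suffix_cons c t).isInfix)
        have h1 := (ih t hlt htinf).1
        refine ⟨?_, fun _ => ?_⟩ <;>
          · rw [pvScanB_nonmarker c t _ hrep, h1]

theorem pvCollapseA_eq_scanB (n : Nat) : ∀ (l : List Char), l.length ≤ n →
    pvCollapseA l = pvScanB l false := by
  induction n with
  | zero =>
    intro l hl
    have : l = [] := by cases l <;> simp_all
    subst this
    rw [pvCollapseA]
    simp [PySem.Chars.isIn, PySem.Chars.find, PySem.Chars.find.go, pvPat, pvScanB_nil]
  | succ n ih =>
    intro l hl
    rw [pvCollapseA]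
    by_cases h : PySem.Chars.isIn pvPat l
    · simp only [h, if_true]
      rw [pvReplace_eq_R]
      have hlt := pvR_length_lt l ((PySem.Chars.isIn_iff_infix _ _).mp h)
      have hle : (pvR l).length ≤ n := by omega
      rw [ih _ hle, pvScanB_R l.length l le_rfl false]
    · simp only [h]
      have hninf : ¬ pvPat <:+: l := fun hh =>
        h ((PySem.Chars.isIn_iff_infix _ _).mpr hh)
      exact ((pvScanB_id l.length l le_rfl hninf).1).symm

theorem pvFold_eq (message : List String) :
    message.foldl (fun acc token => acc ++ [String.ofList (pvCollapseA token.toList)]) [] =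
    message.foldl (fun acc token => acc ++ [String.ofList (pvScanB token.toList false)]) [] := by
  induction message using List.reverseRecOn with
  | nil => rfl
  | append_singleton xs x ih =>
    simp only [List.foldl_append, List.foldl_cons, List.foldl_nil, ih,
      pvCollapseA_eq_scanB x.toList.length x.toList le_rfl]

-- ===== VERDICT (by name: the statement is the Claim_ definition above) =====
theorem token_postprocess_spec : Claim_equal_token_postprocess := by
  intro message _
  unfold Spec_token_postprocess token_postprocess token_postprocess_alt
  rw [pvFold_eq]
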